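-- pv_equiv track=rewrite | github.com/CT2503322/p2-6-phishing | backend/utils/metrics.py | _match_brand
-- ===== SOURCE A (Python) =====
-- from typing import Optional, Tuple, List
--
-- def _normalize_domain(domain: str) -> str:
--     """Normalize domain for comparison (remove www. prefix, convert to lowercase)."""
--     domain = domain.lower()
--     if domain.startswith("www."):
--         domain = domain[4:]
--     return domain
--
-- def _match_brand(netloc: str) -> Optional[str]:
--     """Check if URL domain matches known brands."""
--     known_brands = {
--         "google.com": "Google",
--         "facebook.com": "Facebook",
--         "amazon.com": "Amazon",
--         "microsoft.com": "Microsoft",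
--         "apple.com": "Apple",
--         "paypal.com": "PayPal",
--         "github.com": "GitHub",
--         "twitter.com": "Twitter",
--         "instagram.com": "Instagram",
--         "linkedin.com": "LinkedIn",
--         "youtube.com": "YouTube",
--     }
--
--     domain = _normalize_domain(netloc.split(":")[0])  # Remove port
--
--     # Check exact match
--     if domain in known_brands:
--         return known_brands[domain]
--
--     # Check subdomain match
--     for brand_domain, brand_name in known_brands.items():
--         if domain.endswith("." + brand_domain):
--             return brand_name
--
--     return None
-- ===== SOURCE B (Python) =====
-- def _normalize_domain(domain: str) -> str:
--     """Normalize domain for comparison (remove www. prefix, convert to lowercase)."""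
--     domain = domain.lower()
--     if domain.startswith("www."):
--         domain = domain[4:]
--     return domain
--
--
-- def _match_brand(netloc):
--     """Check if URL domain matches known brands."""
--     known_brands = {
--         "google.com": "Google",
--         "facebook.com": "Facebook",
--         "amazon.com": "Amazon",
--         "microsoft.com": "Microsoft",
--         "apple.com": "Apple",
--         "paypal.com": "PayPal",
--         "github.com": "GitHub",
--         "twitter.com": "Twitter",
--         "instagram.com": "Instagram",
--         "linkedin.com": "LinkedIn",
--         "youtube.com": "YouTube",
--     }
--
--     domain = _normalize_domain(netloc.split(":")[0])  # Remove port
--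
--     # Try every label-suffix of the domain, longest first: i = 0 is the whole
--     # domain (exact match), i >= 1 are the suffixes after each dot boundary.
--     parts = domain.split(".")
--     for i in range(len(parts)):
--         hit = known_brands.get(".".join(parts[i:]))
--         if hit is not None:
--             return hit
--     return None
-- ===== Notes on version B (the rewrite author's own statement) =====
-- stated objective: alternative
-- what changed: Instead of an exact lookup followed by an endswith-scan over all brand domains, B splits the normalized domain into dot-separated labels and tries each label-suffix (joined back, longest first) with a direct dict lookup, so the brand table is never iterated.
import Mathlib
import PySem

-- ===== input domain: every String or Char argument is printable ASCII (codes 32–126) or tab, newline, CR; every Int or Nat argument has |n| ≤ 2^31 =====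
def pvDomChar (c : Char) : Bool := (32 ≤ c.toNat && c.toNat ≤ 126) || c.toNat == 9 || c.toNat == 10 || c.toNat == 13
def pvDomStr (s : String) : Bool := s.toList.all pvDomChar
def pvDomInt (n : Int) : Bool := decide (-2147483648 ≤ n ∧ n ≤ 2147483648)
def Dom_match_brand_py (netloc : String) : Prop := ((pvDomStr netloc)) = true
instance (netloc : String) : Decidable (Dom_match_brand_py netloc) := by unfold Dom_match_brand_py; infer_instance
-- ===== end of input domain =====

-- B replaces A's exact lookup + endswith-scan over the brand table by a single loop over
-- the domain's label-suffixes (rejoined labels, longest first) with direct dict lookups;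
-- same return value everywhere (objective: alternative).

-- ===== PORT A =====
-- the known_brands dict literal (shared by both Pythons verbatim)
def pvBrands : PySem.Dict String String := PySem.Dict.ofList
  [("google.com", "Google"), ("facebook.com", "Facebook"), ("amazon.com", "Amazon"),
   ("microsoft.com", "Microsoft"), ("apple.com", "Apple"), ("paypal.com", "PayPal"),
   ("github.com", "GitHub"), ("twitter.com", "Twitter"), ("instagram.com", "Instagram"),
   ("linkedin.com", "LinkedIn"), ("youtube.com", "YouTube")]

-- _normalize_domain (module helper used by both Pythons)
def pvNormalize (domain : String) : String :=
  let d := PySem.Str.lower domain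
  if PySem.Str.startswith d "www." then PySem.Str.slice d (some 4) none else d

-- A's 'for brand_domain, brand_name in known_brands.items(): if domain.endswith("." + brand_domain)'
def pvAScan (domain : String) : List (String × String) → Option String
  | [] => none
  | (bd, bn) :: rest =>
    if PySem.Str.endswith domain ("." ++ bd) = true then some bn else pvAScan domain rest

def match_brand_py (netloc : String) : Option String :=
  let domain := pvNormalize (((PySem.Str.split? netloc ":").getD []).headD "")
  match PySem.Dict.get? pvBrands domain with  -- 'if domain in known_brands: return known_brands[domain]'
  | some v => some v
  | none => pvAScan domain pvBrands.items

-- ===== PORT B =====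
-- B's 'for i in range(len(parts)): hit = known_brands.get(".".join(parts[i:])); if hit is not None: return hit'
def pvBLoop (parts : List String) : List Int → Option String
  | [] => none
  | i :: is =>
    match PySem.Dict.get? pvBrands (PySem.Str.join "." (PySem.List.slice parts (some i) none)) with
    | some v => some v
    | none => pvBLoop parts is

def match_brand_py_alt (netloc : String) : Option String :=
  let domain := pvNormalize (((PySem.Str.split? netloc ":").getD []).headD "")
  let parts := (PySem.Str.split? domain ".").getD []   -- 'parts = domain.split(".")'
  pvBLoop parts (PySem.List.pyRange 0 (parts.length : Int) 1)

-- ===== PRECONDITION & SPEC =====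
def Spec_match_brand_py (netloc : String) (out : Option String) : Prop := out = match_brand_py_alt netloc
instance (netloc : String) (out : Option String) : Decidable (Spec_match_brand_py netloc out) := by unfold Spec_match_brand_py; infer_instance

-- ===== CLAIM (what is proved, stated in full; the proofs are below) =====
def Claim_equal_match_brand_py : Prop := ∀ (netloc : String), Dom_match_brand_py netloc → Spec_match_brand_py netloc (match_brand_py netloc)

-- ===== LEMMAS AND PROOFS =====

-- proof-side intermediate: a character-level scan of the domain that looks up the suffix after each dot
def pvCharScan : List Char → Option String
  | [] => none
  | c :: rest =>
    if c = '.' then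
      match PySem.Dict.get? pvBrands (String.ofList rest) with
      | some v => some v
      | none => pvCharScan rest
    else pvCharScan rest

-- proof-side intermediate: structural suffix scan over the (remaining) parts list
def pvSuff : List String → Option String
  | [] => none
  | p :: ps =>
    match PySem.Dict.get? pvBrands (PySem.Str.join "." (p :: ps)) with
    | some v => some v
    | none => pvSuff ps

-- proof-side reimplementation of Chars.splitOn for the one-character separator '.'
def pvSplit : List Char → List Char → List (List Char)
  | pre, [] => [pre]
  | pre, c :: rest => if c = '.' then pre :: pvSplit [] rest else pvSplit (pre ++ [c]) rest

-- ---- A-side: exact lookup + endswith scan  =  exact lookup + char-level suffix scan ----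

lemma pv_endswith_iff (d : String) (p : String) :
    PySem.Str.endswith d ("." ++ p) = true ↔ '.' :: p.toList <:+ d.toList := by
  simp [pysem, PySem.Chars.endswith_iff, String.toList_append]

lemma pv_aScan_eq_find (d : String) (l : List (String × String)) :
    pvAScan d l = (l.find? (fun p => PySem.Str.endswith d ("." ++ p.1))).map (·.2) := by
  induction l with
  | nil => rfl
  | cons hd tl ih =>
    obtain ⟨bd, bn⟩ := hd
    rw [pvAScan, List.find?_cons]
    cases h : PySem.Str.endswith d ("." ++ bd) <;> simp only [ih] <;> rfl

lemma pv_charScan_some (L : List Char) (v : String) (h : pvCharScan L = some v) :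
    ∃ rest, '.' :: rest <:+ L ∧ PySem.Dict.get? pvBrands (String.ofList rest) = some v := by
  induction L with
  | nil => simp [pvCharScan] at h
  | cons c rest ih =>
    by_cases hc : c = '.'
    · subst hc
      rw [pvCharScan] at h
      cases hg : PySem.Dict.get? pvBrands (String.ofList rest) with
      | some w =>
        rw [hg] at h
        exact ⟨rest, List.suffix_refl _, by simpa [hg] using h⟩
      | none =>
        rw [hg] at h
        obtain ⟨r, hs, hgr⟩ := ih h
        exact ⟨r, hs.trans (List.suffix_cons _ _), hgr⟩
    · rw [pvCharScan, if_neg hc] at h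
      obtain ⟨r, hs, hgr⟩ := ih h
      exact ⟨r, hs.trans (List.suffix_cons _ _), hgr⟩

lemma pv_charScan_isSome (L rest : List Char) (v : String)
    (hs : '.' :: rest <:+ L) (hg : PySem.Dict.get? pvBrands (String.ofList rest) = some v) :
    (pvCharScan L).isSome := by
  induction L with
  | nil => simp at hs
  | cons c tl ih =>
    rcases List.suffix_cons_iff.mp hs with heq | hsuf
    · injection heq with hc ht
      subst ht
      subst hc
      rw [pvCharScan]
      simp [hg]
    · have := ih hsuf
      rw [pvCharScan]
      by_cases hc : c = '.'
      · subst hc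
        cases hgc : PySem.Dict.get? pvBrands (String.ofList tl) with
        | some w => simp
        | none => simpa [hgc] using this
      · simpa [hc] using this

lemma pv_no_cross_suffix : ∀ b1 ∈ pvBrands.keys, ∀ b2 ∈ pvBrands.keys,
    ¬ ('.' :: b1.toList <:+ b2.toList) := by decide
lemma pv_nodup_keys : pvBrands.keys.Nodup := by decide

lemma pv_unique (L : List Char) (b1 b2 : String)
    (h1m : b1 ∈ pvBrands.keys) (h2m : b2 ∈ pvBrands.keys)
    (h1 : '.' :: b1.toList <:+ L) (h2 : '.' :: b2.toList <:+ L) : b1 = b2 := by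
  have hinj : ∀ a b : String, a.toList = b.toList → a = b := by
    intro a b h
    have := congrArg String.ofList h
    simpa [String.ofList_toList] using this
  rcases List.suffix_or_suffix_of_suffix h1 h2 with h | h
  · rcases List.suffix_cons_iff.mp h with he | hs
    · injection he with _ ht; exact hinj _ _ ht
    · exact absurd hs (pv_no_cross_suffix b1 h1m b2 h2m)
  · rcases List.suffix_cons_iff.mp h with he | hs
    · injection he with _ ht; exact (hinj _ _ ht).symm
    · exact absurd hs (pv_no_cross_suffix b2 h2m b1 h1m)

lemma pv_scan_eq (d : String) : pvAScan d pvBrands.items = pvCharScan d.toList := by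
  by_cases hex : ∃ p ∈ pvBrands.items, '.' :: p.1.toList <:+ d.toList
  · obtain ⟨p, hp, hsuf⟩ := hex
    have hget : PySem.Dict.get? pvBrands p.1 = some p.2 :=
      PySem.Dict.get?_of_mem_items _ hp pv_nodup_keys
    have hk1 : p.1 ∈ pvBrands.keys := PySem.Dict.mem_keys_of_mem_items _ hp
    have hiss : (pvCharScan d.toList).isSome :=
      pv_charScan_isSome d.toList p.1.toList p.2 hsuf (by rw [String.ofList_toList]; exact hget)
    obtain ⟨v, hv⟩ := Option.isSome_iff_exists.mp hiss
    obtain ⟨rest, hrs, hrg⟩ := pv_charScan_some _ _ hv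
    have hrm : (String.ofList rest, v) ∈ pvBrands.items :=
      PySem.Dict.mem_items_of_get?_eq_some _ hrg
    have hrk : String.ofList rest ∈ pvBrands.keys := PySem.Dict.mem_keys_of_mem_items _ hrm
    have hkeq : String.ofList rest = p.1 :=
      pv_unique d.toList _ _ hrk hk1 (by simpa [String.toList_ofList] using hrs) hsuf
    have hvp : v = p.2 := by
      have := PySem.Dict.get?_of_mem_items _ hrm pv_nodup_keys
      rw [hkeq, hget] at this
      exact (Option.some.injEq .. ▸ this.symm)
    have hfs : (pvBrands.items.find? (fun q => PySem.Str.endswith d ("." ++ q.1))).isSome := by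
      rw [List.find?_isSome]
      exact ⟨p, hp, by simpa using (pv_endswith_iff d p.1).mpr hsuf⟩
    obtain ⟨q, hq⟩ := Option.isSome_iff_exists.mp hfs
    have hqpred : PySem.Str.endswith d ("." ++ q.1) = true := by
      simpa using List.find?_some hq
    have hqm : q ∈ pvBrands.items := List.mem_of_find?_eq_some hq
    have hqk : q.1 ∈ pvBrands.keys := PySem.Dict.mem_keys_of_mem_items _ hqm
    have hqeq : q.1 = p.1 :=
      pv_unique d.toList _ _ hqk hk1 ((pv_endswith_iff d q.1).mp hqpred) hsuf
    have hq2 : q.2 = p.2 := by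
      have h1 := PySem.Dict.get?_of_mem_items _ hqm pv_nodup_keys
      rw [hqeq, hget] at h1
      exact (Option.some.injEq .. ▸ h1.symm)
    rw [pv_aScan_eq_find, hq, hv, hvp]
    simp [hq2]
  · have hex : ∀ p ∈ pvBrands.items, ¬ ('.' :: p.1.toList <:+ d.toList) := by
      simpa using hex
    rw [pv_aScan_eq_find]
    have hfn : pvBrands.items.find? (fun q => PySem.Str.endswith d ("." ++ q.1)) = none := by
      rw [List.find?_eq_none]
      intro q hqm
      simp only [Bool.not_eq_true]
      rw [Bool.eq_false_iff]
      intro hq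
      exact hex q hqm ((pv_endswith_iff d q.1).mp hq)
    cases hv : pvCharScan d.toList with
    | none => rw [hfn]; rfl
    | some v =>
      obtain ⟨rest, hrs, hrg⟩ := pv_charScan_some _ _ hv
      have hrm : (String.ofList rest, v) ∈ pvBrands.items :=
        PySem.Dict.mem_items_of_get?_eq_some _ hrg
      exact absurd (by simpa [String.toList_ofList] using hrs) (hex _ hrm)

-- ---- splitOn '.'  =  pvSplit [] ----

lemma pv_splitOn_go_eq : ∀ (fuel : Nat) (l cur : List Char) (acc : List (List Char)),
    l.length < fuel →
    PySem.Chars.splitOn.go ['.'] fuel l cur acc = acc.reverse ++ pvSplit cur.reverse l := by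
  intro fuel
  induction fuel with
  | zero => intro l cur acc h; omega
  | succ f ih =>
    intro l cur acc h
    cases l with
    | nil => simp [PySem.Chars.splitOn.go, pvSplit]
    | cons c rest =>
      rw [PySem.Chars.splitOn.go]
      by_cases hc : c = '.'
      · subst hc
        have hpre : List.isPrefixOf ['.'] ('.' :: rest) = true := by simp [List.isPrefixOf]
        rw [if_pos hpre]
        simp only [List.length_cons] at h
        rw [ih _ _ _ (by simpa using Nat.lt_of_succ_lt_succ h)]
        simp [pvSplit]
      · have hpre : List.isPrefixOf ['.'] (c :: rest) = false := by
          simp [List.isPrefixOf]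
          intro h'; exact hc h'.symm
        rw [if_neg (by simp [hpre])]
        simp only [List.length_cons] at h
        rw [ih _ _ _ (by omega)]
        simp [pvSplit, hc]

lemma pv_splitOn_eq (cs : List Char) : PySem.Chars.splitOn cs ['.'] = pvSplit [] cs := by
  rw [PySem.Chars.splitOn, pv_splitOn_go_eq (cs.length + 1) cs [] [] (by omega)]
  simp

-- ---- properties of pvSplit ----

lemma pv_split_ne_nil : ∀ (l pre : List Char), pvSplit pre l ≠ [] := by
  intro l
  induction l with
  | nil => intro pre; simp [pvSplit]
  | cons c rest ih =>
    intro pre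
    rw [pvSplit]
    split
    · simp
    · exact ih _

lemma pv_intercalate_cc (x y : List Char) (l : List (List Char)) :
    List.intercalate ['.'] (x :: y :: l) = x ++ '.' :: List.intercalate ['.'] (y :: l) := by
  rw [List.intercalate, List.intercalate,
      show List.intersperse ['.'] (x :: y :: l) = x :: ['.'] :: List.intersperse ['.'] (y :: l) from rfl]
  simp

lemma pv_split_join : ∀ (l pre : List Char), List.intercalate ['.'] (pvSplit pre l) = pre ++ l := by
  intro l
  induction l with
  | nil => intro pre; simp [pvSplit, List.intercalate]
  | cons c rest ih =>
    intro pre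
    by_cases hc : c = '.'
    · subst hc
      rw [pvSplit, if_pos rfl]
      obtain ⟨y, l, hyl⟩ := List.exists_cons_of_ne_nil (pv_split_ne_nil rest [])
      rw [hyl, pv_intercalate_cc, ← hyl, ih]
      simp
    · rw [pvSplit, if_neg hc, ih]
      simp


lemma pv_split_no_dot : ∀ (l pre : List Char), ('.' ∉ pre) → ∀ p ∈ pvSplit pre l, '.' ∉ p := by
  intro l
  induction l with
  | nil => intro pre hpre p hp; simp [pvSplit] at hp; subst hp; exact hpre
  | cons c rest ih =>
    intro pre hpre p hp
    by_cases hc : c = '.'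
    · subst hc
      rw [pvSplit, if_pos rfl] at hp
      rcases List.mem_cons.mp hp with h | h
      · subst h; exact hpre
      · exact ih [] (by simp) p h
    · rw [pvSplit, if_neg hc] at hp
      exact ih (pre ++ [c]) (by simp [hpre]; exact fun h => hc h.symm) p hp

-- ---- B-side: the range/slice loop  =  structural suffix scan  =  exact lookup + char scan ----

lemma pv_bloop_eq_suff (parts : List String) : ∀ (n k : Nat), k + n = parts.length →
    pvBLoop parts (PySem.List.pyRange (k : Int) (parts.length : Int) 1) = pvSuff (parts.drop k) := by
  intro n
  induction n with
  | zero =>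
    intro k hk
    rw [PySem.List.pyRange_one_eq_nil (by omega)]
    rw [List.drop_eq_nil_of_le (by omega)]
    rfl
  | succ m ih =>
    intro k hk
    rw [PySem.List.pyRange_one_cons (by omega)]
    have hk' : k < parts.length := by omega
    have hdrop : parts.drop k = parts[k] :: parts.drop (k + 1) := List.drop_eq_getElem_cons hk'
    rw [pvBLoop]
    have hslice : PySem.List.slice parts (some (k : Int)) none = parts.drop k :=
      PySem.List.slice_from_natCast parts k
    rw [hslice, hdrop, pvSuff]
    have : ((k : Int) + 1) = ((k + 1 : Nat) : Int) := by push_cast; ring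
    rw [this, ih (k + 1) (by omega)]

lemma pv_charScan_no_dot (l : List Char) (h : '.' ∉ l) : pvCharScan l = none := by
  induction l with
  | nil => rfl
  | cons c rest ih =>
    rw [pvCharScan, if_neg (by intro hc; exact h (hc ▸ List.mem_cons_self))]
    exact ih (fun hm => h (List.mem_cons_of_mem _ hm))

lemma pv_charScan_append_no_dot (p l : List Char) (h : '.' ∉ p) :
    pvCharScan (p ++ l) = pvCharScan l := by
  induction p with
  | nil => rfl
  | cons c rest ih =>
    rw [List.cons_append, pvCharScan, if_neg (by intro hc; exact h (hc ▸ List.mem_cons_self))]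
    exact ih (fun hm => h (List.mem_cons_of_mem _ hm))

lemma pv_str_join_map (ps : List (List Char)) :
    PySem.Str.join "." (ps.map String.ofList) = String.ofList (List.intercalate ['.'] ps) := by
  simp [PySem.Str.join, PySem.Chars.join, List.map_map, Function.comp_def]

lemma pv_suff_eq (ps : List (List Char)) (hne : ps ≠ []) (hnd : ∀ p ∈ ps, '.' ∉ p) :
    pvSuff (ps.map String.ofList) =
      match PySem.Dict.get? pvBrands (String.ofList (List.intercalate ['.'] ps)) with
      | some v => some v
      | none => pvCharScan (List.intercalate ['.'] ps) := by
  induction ps with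
  | nil => exact absurd rfl hne
  | cons p qs ih =>
    cases qs with
    | nil =>
      rw [List.map_cons, List.map_nil, pvSuff]
      have hj : List.intercalate ['.'] [p] = p := by simp [List.intercalate]
      have hj1 : PySem.Str.join "." [String.ofList p] = String.ofList p := by
        simp [PySem.Str.join, PySem.Chars.join, List.intercalate]
      rw [hj1, hj]
      cases hg : PySem.Dict.get? pvBrands (String.ofList p) with
      | some v => rfl
      | none => simp [pvSuff, pv_charScan_no_dot p (hnd p List.mem_cons_self)]
    | cons q rs =>
      rw [List.map_cons, pvSuff, ← List.map_cons, pv_str_join_map]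
      have hint : List.intercalate ['.'] (p :: q :: rs) = p ++ '.' :: List.intercalate ['.'] (q :: rs) :=
        pv_intercalate_cc p q rs
      rw [hint]
      cases hg : PySem.Dict.get? pvBrands (String.ofList (p ++ '.' :: List.intercalate ['.'] (q :: rs))) with
      | some v => rfl
      | none =>
        have hcs : pvCharScan (p ++ '.' :: List.intercalate ['.'] (q :: rs)) =
            match PySem.Dict.get? pvBrands (String.ofList (List.intercalate ['.'] (q :: rs))) with
            | some v => some v
            | none => pvCharScan (List.intercalate ['.'] (q :: rs)) := by
          rw [pv_charScan_append_no_dot _ _ (hnd p List.mem_cons_self), pvCharScan, if_pos rfl]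
        rw [hcs, ← ih (by simp) (fun r hr => hnd r (List.mem_cons_of_mem _ hr))]

-- ===== VERDICT (by name: the statement is the Claim_ definition above) =====

lemma pv_main (d : String) :
    (match PySem.Dict.get? pvBrands d with
     | some v => some v
     | none => pvAScan d pvBrands.items) =
    pvBLoop ((PySem.Str.split? d ".").getD [])
      (PySem.List.pyRange 0 ((((PySem.Str.split? d ".").getD []).length : Nat) : Int) 1) := by
  have hsp : (PySem.Str.split? d ".").getD [] = (pvSplit [] d.toList).map String.ofList := by
    simp [PySem.Str.split?, PySem.Chars.split?, pv_splitOn_eq]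
  rw [hsp]
  rw [show (0 : Int) = ((0 : Nat) : Int) from by simp]
  rw [pv_bloop_eq_suff _ ((pvSplit [] d.toList).map String.ofList).length 0 (by simp), List.drop_zero]
  rw [pv_suff_eq _ (pv_split_ne_nil d.toList []) (pv_split_no_dot d.toList [] (by simp))]
  rw [pv_split_join, List.nil_append, String.ofList_toList]
  cases hg : PySem.Dict.get? pvBrands d with
  | some v => simp
  | none => simp [pv_scan_eq d]

set_option maxHeartbeats 1000000 in
theorem match_brand_py_spec : Claim_equal_match_brand_py := by
  intro netloc _
  show match_brand_py netloc = match_brand_py_alt netloc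
  unfold match_brand_py match_brand_py_alt
  exact pv_main (pvNormalize (((PySem.Str.split? netloc ":").getD []).headD ""))
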